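-- pv_equiv track=rewrite | github.com/Lalit-Bhadauriya/fermulerpy | src/fermulerpy/elementary/factorization.py | prime_table
-- ===== SOURCE A (Python) =====
-- def isPrime(num):
--     """
--     Checks if the number is prime
--
--     Parameters
--     ----------
--     num : int
--         denotes a natural number
--     return : bool
--         return true if the number is prime otherwise returns false
--
--     """
--     if(num < 0):
--         raise ValueError(
--             "num must be a natural natural"
--         )
--
--     if(num <= 1):
--         return False
--     if(num <= 3):
--         return True
--     if(num%2 == 0 or num%3==0):
--         return False
--
--     i = 5
--
--     while(i*i <= num):
--         if(num%i == 0 or num%(i+2) == 0 ):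
--             return False
--         i = i + 6
--
--     return True
--
-- def prime_series(count):
--     """
--     Returns an array of prime numbers
--
--     Parameters
--     ----------
--     count : int
--         denotes the count of prime numbers
--     return : array
--         return an array of length 'count'
--
--     """
--     if(count < 0 or int(count)!=count):
--         raise ValueError(
--             "Input must be a non-negative integer"
--         )
--
--     arr_prime = []
--     i=0
--     j=2
--
--     while(i!=count):
--         if(isPrime(j)):
--             arr_prime.append(j)
--             j = j + 1
--             i = i + 1
--         else:
--             j = j + 1
--
--     return arr_prime
--
-- def prime_table(count):
--     """
--     Returns an array of numbers of prime-table
--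
--     Parameters
--     ----------
--     count : int
--         denotes a non-negative integer
--     return : array
--         returns an array of length 'count'
--
--     """
--     if(count < 0 or int(count)!=count):
--         raise ValueError(
--             "count must be a non-negative integer"
--         )
--
--     prime_array = prime_series(count)
--
--     for i in range(1,len(prime_array)):
--         prime_array[i] = prime_array[i] * prime_array[i-1]
--
--     prime_table_array = [i+1 for i in prime_array]
--
--     return prime_table_array
-- ===== SOURCE B (Python) =====
-- def prime_table(count):
--     if count < 0 or int(count) != count:
--         raise ValueError(
--             "count must be a non-negative integer"
--         )
--     primes = []
--     j = 2
--     while len(primes) < count: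
--         is_p = True
--         for p in primes:
--             if p * p > j:
--                 break
--             if j % p == 0:
--                 is_p = False
--                 break
--         if is_p:
--             primes.append(j)
--         j += 1
--     table = []
--     prod = 1
--     for p in primes:
--         prod *= p
--         table.append(prod + 1)
--     return table
-- ===== Notes on version B (the rewrite author's own statement) =====
-- stated objective: alternative
-- what changed: B keeps the list of primes found so far and tests each candidate by dividing only by those primes up to its square root (with early break), then builds the table in a separate accumulating pass, instead of A's standalone 6k+-1 trial division per candidate followed by an in-place prefix-product pass and a +1 comprehension.
-- outside the precondition, e.g. on prime_table(-1): A raises ValueError, B raises ValueError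
import Mathlib
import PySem

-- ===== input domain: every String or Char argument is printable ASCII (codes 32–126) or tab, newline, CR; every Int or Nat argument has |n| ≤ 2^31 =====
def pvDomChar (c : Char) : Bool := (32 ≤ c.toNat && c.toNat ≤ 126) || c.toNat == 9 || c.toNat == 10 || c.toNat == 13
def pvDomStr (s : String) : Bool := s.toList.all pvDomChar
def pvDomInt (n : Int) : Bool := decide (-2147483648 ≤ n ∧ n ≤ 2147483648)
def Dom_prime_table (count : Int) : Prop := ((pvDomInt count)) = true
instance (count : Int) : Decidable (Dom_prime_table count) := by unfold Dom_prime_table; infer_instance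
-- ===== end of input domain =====

-- B tests each candidate by dividing only by the primes found so far (up to its square root,
-- early break) and builds the table in a separate accumulating pass, replacing A's standalone
-- 6k±1 trial division, in-place prefix-product pass and +1 comprehension.

-- Helper lemmas placed above the ports are cited by the ports' termination proofs only.
theorem toNatDec {a b : Int} (hab : a < b) (hb : 0 < b) : a.toNat < b.toNat :=
  (Int.toNat_lt_toNat hb).mpr hab

theorem ltOfSqLe {i num : Int} (h1 : i * i ≤ num) (hgt : 1 < i) : i < num := by
  have h := mul_lt_mul_of_pos_left hgt (lt_trans Int.zero_lt_one hgt)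
  rw [mul_one] at h
  exact lt_of_lt_of_le h h1

theorem no_small_divisor_of_prime (p : ℕ) (hp : p.Prime) :
    ∀ d : Int, 2 ≤ d → d < (p : Int) → PySem.Int.mod (p : Int) d ≠ 0 := by
  intro d h2 hlt hmod
  rw [PySem.Int.mod_eq_zero_iff_dvd] at hmod
  have hd : (d.toNat : Int) = d := Int.toNat_of_nonneg (by omega)
  rw [← hd] at hmod
  rw [Int.natCast_dvd_natCast] at hmod
  rcases (Nat.Prime.eq_one_or_self_of_dvd hp _ hmod) with h | h
  · rw [h] at hd; exact absurd (hd ▸ h2) (by decide)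
  · rw [h] at hd; exact absurd (hd ▸ hlt) (lt_irrefl _)

-- Generic while-loop termination gadget: distance to the next input accepted by a test P
-- that accepts every prime; both ports' while loops cite it.
theorem exists_P_add {P : Int → Bool} (hpr : ∀ p : ℕ, p.Prime → P (p : Int) = true)
    (j : Int) : ∃ k : ℕ, P (j + (k : Int)) = true := by
  obtain ⟨p, hle, hp⟩ := Nat.exists_infinite_primes j.toNat
  refine ⟨((p : Int) - j).toNat, ?_⟩
  have hj : j ≤ (p : Int) := le_trans (Int.self_le_toNat j) (Int.ofNat_le.mpr hle)
  have harg : j + (((p : Int) - j).toNat : Int) = (p : Int) := by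
    rw [Int.toNat_of_nonneg (sub_nonneg.mpr hj)]
    exact add_sub_cancel j (p : Int)
  rw [harg]
  exact hpr p hp

def gapOf {P : Int → Bool} (ex : ∀ j : Int, ∃ k : ℕ, P (j + (k : Int)) = true) (j : Int) : ℕ :=
  Nat.find (ex j)

theorem gapOf_step {P : Int → Bool} (ex : ∀ j : Int, ∃ k : ℕ, P (j + (k : Int)) = true)
    (j : Int) (h : P j = false) : gapOf ex (j + 1) < gapOf ex j := by
  have h0 : 0 < gapOf ex j := by
    rcases Nat.eq_zero_or_pos (gapOf ex j) with h' | h'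
    · exfalso
      have hs := Nat.find_spec (ex j)
      rw [show Nat.find (ex j) = gapOf ex j from rfl, h'] at hs
      simp only [Nat.cast_zero, add_zero] at hs
      rw [h] at hs
      exact Bool.noConfusion hs
    · exact h'
  have hle : gapOf ex (j + 1) ≤ gapOf ex j - 1 := by
    apply Nat.find_le
    have hs := Nat.find_spec (ex j)
    have harg : j + 1 + ((gapOf ex j - 1 : ℕ) : Int) = j + ((gapOf ex j : ℕ) : Int) := by
      rw [Nat.cast_sub h0, Nat.cast_one]
      ring
    rw [harg]
    exact hs
  exact lt_of_le_of_lt hle (Nat.sub_lt h0 (by decide))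

-- ===== PORT A =====
theorem isPrimeLoop_dec (num i : Int) (h1 : i * i ≤ num)
    (h2 : ¬(PySem.Int.mod num i == 0 || PySem.Int.mod num (i + 2) == 0) = true) :
    (num - (i + 6)).toNat < (num - i).toNat := by
  have ha : PySem.Int.mod num i ≠ 0 := fun hmod => h2 (by rw [hmod]; rfl)
  have hi : i < num := by
    rcases lt_trichotomy i 0 with h0 | h0 | h0
    · exact lt_of_lt_of_le h0 (le_trans (mul_self_nonneg i) h1)
    · subst h0
      have hnum0 : 0 ≤ num := le_trans (le_of_eq (zero_mul 0).symm) h1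
      rcases lt_or_eq_of_le hnum0 with h | h
      · exact h
      · exact absurd ((PySem.Int.mod_eq_zero_iff_dvd num 0).mpr (h ▸ dvd_refl 0)) ha
    · rcases lt_trichotomy i 1 with h1' | h1' | h1'
      · exact absurd (Int.lt_iff_add_one_le.mp h0) (by rw [zero_add]; exact not_le.mpr h1')
      · exact absurd ((PySem.Int.mod_eq_zero_iff_dvd num 1).mpr (one_dvd num))
          (h1' ▸ ha)
      · exact ltOfSqLe h1 h1'
  exact toNatDec (sub_lt_sub_left (lt_add_of_pos_right i (by decide)) num) (sub_pos.mpr hi)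

def isPrimeLoop (num : Int) (i : Int) : Bool :=
  if i * i ≤ num then
    if PySem.Int.mod num i == 0 || PySem.Int.mod num (i + 2) == 0 then false
    else isPrimeLoop num (i + 6)
  else true
termination_by (num - i).toNat
decreasing_by
  rename_i h1 h2
  exact isPrimeLoop_dec num i h1 h2

def isPrime (num : Int) : Bool :=
  if num < 0 then false
  else if num ≤ 1 then false
  else if num ≤ 3 then true
  else if PySem.Int.mod num 2 == 0 || PySem.Int.mod num 3 == 0 then false
  else isPrimeLoop num 5

theorem isPrimeLoop_true_of (num i : Int) (h5 : 5 ≤ i)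
    (hnd : ∀ d : Int, 2 ≤ d → d < num → PySem.Int.mod num d ≠ 0) :
    isPrimeLoop num i = true := by
  induction i using isPrimeLoop.induct (num := num) with
  | case1 i hle hmod =>
    simp only [beq_iff_eq, Bool.or_eq_true] at hmod
    have h2i : (2:Int) < i := lt_of_lt_of_le (by decide) h5
    have hilt : i < num := ltOfSqLe hle (lt_trans (by decide) h2i)
    rcases hmod with h | h
    · exact absurd h (hnd i (le_of_lt h2i) hilt)
    · refine absurd h (hnd (i + 2) (le_add_of_nonneg_left (le_trans (by decide) (le_of_lt h2i))) ?_)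
      calc i + 2 < i + i := add_comm 2 i ▸ add_lt_add_left h2i i
        _ = i * 2 := (mul_two i).symm
        _ ≤ i * i := mul_le_mul_of_nonneg_left (le_of_lt h2i)
              (le_trans (by decide) (le_of_lt h2i))
        _ ≤ num := hle
  | case2 i hle hmod ih =>
    rw [isPrimeLoop, if_pos hle, if_neg hmod]
    exact ih (le_trans h5 (by exact le_add_of_nonneg_right (by decide)))
  | case3 i hle => rw [isPrimeLoop, if_neg hle]

theorem isPrime_true_of_prime (p : ℕ) (hp : p.Prime) : isPrime (p : Int) = true := by
  have h2 : 2 ≤ p := hp.two_le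
  have h1p : (1:Int) < (p : Int) := by exact_mod_cast Nat.lt_of_lt_of_le Nat.one_lt_two h2
  rw [isPrime, if_neg (not_lt.mpr (Int.natCast_nonneg p)), if_neg (not_le.mpr h1p)]
  by_cases h3 : (p : Int) ≤ 3
  · rw [if_pos h3]
  · have h3p : (3:Int) < (p : Int) := not_le.mp h3
    rw [if_neg h3, if_neg, ]
    · exact isPrimeLoop_true_of _ _ (le_refl 5) (no_small_divisor_of_prime p hp)
    · simp only [beq_iff_eq, Bool.or_eq_true, not_or]
      exact ⟨no_small_divisor_of_prime p hp 2 (le_refl 2) (lt_trans (by decide) h3p),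
             no_small_divisor_of_prime p hp 3 (by decide) h3p⟩

theorem exists_isPrime_add (j : Int) : ∃ k : ℕ, isPrime (j + (k : Int)) = true :=
  exists_P_add isPrime_true_of_prime j

theorem seriesLoop_dec1 (count i : Int) (g1 g2 : ℕ) (h : i < count) :
    Prod.Lex (· < ·) (· < ·) ((count - (i + 1)).toNat, g1) ((count - i).toNat, g2) :=
  Prod.Lex.left _ _ (toNatDec (sub_lt_sub_left (lt_add_of_pos_right i (by decide)) count)
    (sub_pos.mpr h))

def seriesLoop (count : Int) (i : Int) (j : Int) (arr : List Int) : List Int :=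
  if i < count then
    if isPrime j then seriesLoop count (i + 1) (j + 1) (arr ++ [j])
    else seriesLoop count i (j + 1) arr
  else arr
termination_by ((count - i).toNat, gapOf exists_isPrime_add j)
decreasing_by
  · exact seriesLoop_dec1 count i _ _ (by assumption)
  · rename_i h1 h2
    exact Prod.Lex.right _ (gapOf_step exists_isPrime_add j
      ((Bool.eq_false_or_eq_true _).resolve_left h2))

def tableStep (a : List Int) (i : ℕ) : List Int :=
  a.set i (a.getD i 0 * a.getD (i - 1) 0)

def prime_table (count : Int) : List Int :=
  if count < 0 then []
  else
    let prime_array := seriesLoop count 0 2 []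
    let prime_array2 := (List.range' 1 (prime_array.length - 1)).foldl tableStep prime_array
    prime_array2.map (· + 1)

-- ===== PORT B =====
-- the inner for-loop over the primes found so far, with its two breaks
def checkPrimes (j : Int) : List Int → Bool
  | [] => true
  | p :: ps =>
    if p * p > j then true
    else if PySem.Int.mod j p == 0 then false
    else checkPrimes j ps

theorem checkPrimes_true (j : Int) (primes : List Int)
    (h : ∀ p ∈ primes, p * p ≤ j → PySem.Int.mod j p ≠ 0) : checkPrimes j primes = true := by
  induction primes with
  | nil => rfl
  | cons p ps ih =>
    rw [checkPrimes]
    by_cases hgt : p * p > j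
    · rw [if_pos hgt]
    · rw [if_neg hgt, if_neg (by simpa using h p (List.mem_cons_self) (not_lt.mp hgt))]
      exact ih (fun q hq => h q (List.mem_cons_of_mem p hq))

theorem checkPrimes_true_of_prime (primes : List Int) (hp : ∀ p ∈ primes, 2 ≤ p)
    (q : ℕ) (hq : q.Prime) : checkPrimes (q : Int) primes = true := by
  apply checkPrimes_true
  intro p hpm hpp
  have h2p := hp p hpm
  have hlt : p < (q : Int) := by nlinarith
  exact no_small_divisor_of_prime q hq p h2p hlt

theorem existsB (primes : List Int) (hp : ∀ p ∈ primes, 2 ≤ p) (j : Int) :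
    ∃ k : ℕ, checkPrimes (j + (k : Int)) primes = true :=
  exists_P_add (P := fun j => checkPrimes j primes) (checkPrimes_true_of_prime primes hp) j

theorem bLoop_dec1 (count : Int) (primes : List Int) (x : Int) (g1 g2 : ℕ)
    (h : (primes.length : Int) < count) :
    Prod.Lex (· < ·) (· < ·) ((count - ((primes ++ [x]).length : Int)).toNat, g1)
      ((count - (primes.length : Int)).toNat, g2) := by
  have hlen : ((primes ++ [x]).length : Int) = (primes.length : Int) + 1 := by
    rw [List.length_append, List.length_cons, List.length_nil, Nat.cast_add, Nat.cast_one]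
  rw [hlen]
  exact Prod.Lex.left _ _ (toNatDec (sub_lt_sub_left (lt_add_of_pos_right _ (by decide)) count)
    (sub_pos.mpr h))

-- the while loop: primes is the growing list of primes found so far; the Prop arguments
-- only make termination provable (prime candidates exist ahead) and carry no data
def bLoop (count : Int) (primes : List Int) (j : Int)
    (hp : ∀ p ∈ primes, 2 ≤ p) (hj : 2 ≤ j) : List Int :=
  if (primes.length : Int) < count then
    if checkPrimes j primes then
      bLoop count (primes ++ [j]) (j + 1)
        (by intro p hpm
            rcases List.mem_append.mp hpm with h | h
            · exact hp p h
            · rw [List.mem_singleton.mp h]; exact hj)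
        (by omega)
    else bLoop count primes (j + 1) hp (by omega)
  else primes
termination_by ((count - primes.length).toNat, gapOf (P := fun j => checkPrimes j primes) (existsB primes hp) j)
decreasing_by
  · exact bLoop_dec1 count primes _ _ _ (by assumption)
  · rename_i h1 h2
    exact Prod.Lex.right _ (gapOf_step (P := fun j => checkPrimes j primes) (existsB primes hp) j
      ((Bool.eq_false_or_eq_true _).resolve_left h2))

-- the second pass: running product, appending prod + 1
def accLoop (prod : Int) : List Int → List Int
  | [] => []
  | p :: ps => (prod * p + 1) :: accLoop (prod * p) ps

def prime_table_alt (count : Int) : List Int :=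
  if count < 0 then []
  else accLoop 1 (bLoop count [] 2 (by intro p hpm; cases hpm) (by omega))

-- ===== PRECONDITION & SPEC =====
-- Pre_ excludes exactly count < 0, where Python A raises ValueError (B raises there too).
def Pre_prime_table (count : Int) : Prop := 0 ≤ count
instance (count : Int) : Decidable (Pre_prime_table count) := by unfold Pre_prime_table; infer_instance
def pvWitness_prime_table : Int := (5)
def Spec_prime_table (count : Int) (out : List Int) : Prop := out = prime_table_alt count
instance (count : Int) (out : List Int) : Decidable (Spec_prime_table count out) := by unfold Spec_prime_table; infer_instance

-- ===== CLAIM (what is proved, stated in full; the proofs are below) =====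
def Claim_equal_prime_table : Prop := ∀ (count : Int), Dom_prime_table count → Pre_prime_table count → Spec_prime_table count (prime_table count)

-- ===== LEMMAS AND PROOFS =====

theorem isPrimeLoop_iff (num : Int)
    (h2 : PySem.Int.mod num 2 ≠ 0) (h3 : PySem.Int.mod num 3 ≠ 0) (hn : 5 ≤ num) :
    ∀ i, 5 ≤ i → i % 6 = 5 →
      (∀ e, 2 ≤ e → e < i → e * e ≤ num → PySem.Int.mod num e ≠ 0) →
      (isPrimeLoop num i = true ↔ ∀ e, 2 ≤ e → e * e ≤ num → PySem.Int.mod num e ≠ 0) := by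
  intro i
  induction i using isPrimeLoop.induct (num := num) with
  | case1 i hle hmod =>
    intro h5 hI hbelow
    rw [isPrimeLoop, if_pos hle, if_pos hmod]
    simp only [Bool.false_eq_true, false_iff, not_forall]
    simp only [beq_iff_eq, Bool.or_eq_true] at hmod
    rcases hmod with h | h
    · exact ⟨i, by omega, hle, by simpa using h⟩
    · by_cases hsq : (i + 2) * (i + 2) ≤ num
      · exact ⟨i + 2, by omega, hsq, by simpa using h⟩
      · rw [PySem.Int.mod_eq_zero_iff_dvd] at h
        obtain ⟨c, hc⟩ := h
        have hc2 : 2 ≤ c := by nlinarith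
        refine ⟨c, hc2, by nlinarith, ?_⟩
        rw [not_ne_iff, PySem.Int.mod_eq_zero_iff_dvd]
        exact ⟨i + 2, by linarith [hc]⟩
  | case2 i hle hmod ih =>
    intro h5 hI hbelow
    simp only [beq_iff_eq, Bool.or_eq_true, not_or] at hmod
    obtain ⟨hm1, hm2⟩ := hmod
    rw [isPrimeLoop, if_pos hle, if_neg (by simp [hm1, hm2])]
    apply ih (by omega) (by omega)
    intro e he2 hei hee
    by_cases hlt : e < i
    · exact hbelow e he2 hlt hee
    · have : e = i ∨ e = i + 1 ∨ e = i + 2 ∨ e = i + 3 ∨ e = i + 4 ∨ e = i + 5 := by omega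
      rcases this with h | h | h | h | h | h
      · subst h; exact hm1
      · subst h
        intro hmod0
        rw [PySem.Int.mod_eq_zero_iff_dvd] at hmod0
        exact h2 (by rw [PySem.Int.mod_eq_zero_iff_dvd]; exact dvd_trans (by omega) hmod0)
      · subst h; exact hm2
      · subst h
        intro hmod0
        rw [PySem.Int.mod_eq_zero_iff_dvd] at hmod0
        exact h2 (by rw [PySem.Int.mod_eq_zero_iff_dvd]; exact dvd_trans (by omega) hmod0)
      · subst h
        intro hmod0
        rw [PySem.Int.mod_eq_zero_iff_dvd] at hmod0
        exact h3 (by rw [PySem.Int.mod_eq_zero_iff_dvd]; exact dvd_trans (by omega) hmod0)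
      · subst h
        intro hmod0
        rw [PySem.Int.mod_eq_zero_iff_dvd] at hmod0
        exact h2 (by rw [PySem.Int.mod_eq_zero_iff_dvd]; exact dvd_trans (by omega) hmod0)
  | case3 i hle =>
    intro h5 hI hbelow
    rw [isPrimeLoop, if_neg hle]
    simp only [true_iff]
    intro e he2 hee
    apply hbelow e he2 ?_ hee
    by_contra hge
    push Not at hge
    nlinarith

theorem isPrime_iff (j : Int) :
    isPrime j = true ↔ (2 ≤ j ∧ ∀ e, 2 ≤ e → e * e ≤ j → PySem.Int.mod j e ≠ 0) := by
  rcases lt_trichotomy j 4 with h4 | h4 | h4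
  · rcases lt_trichotomy j 2 with h | h | h
    · rw [isPrime]
      rcases lt_trichotomy j 0 with h0 | h0 | h0
      · rw [if_pos h0]; simp; omega
      · rw [if_neg (by omega), if_pos (by omega)]; simp; omega
      · rw [if_neg (by omega), if_pos (by omega)]; simp; omega
    · subst h
      rw [isPrime, if_neg (by omega), if_neg (by omega), if_pos (by omega)]
      simp only [true_iff]
      exact ⟨le_refl 2, fun e he2 hee => absurd hee (by nlinarith)⟩
    · rw [isPrime, if_neg (by omega), if_neg (by omega), if_pos (by omega)]
      simp only [true_iff]
      exact ⟨by omega, fun e he2 hee => absurd hee (by nlinarith)⟩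
  · subst h4
    have hA : isPrime 4 = false := by
      rw [isPrime, if_neg (by omega), if_neg (by omega), if_neg (by omega), if_pos (by decide)]
    rw [hA]
    simp only [Bool.false_eq_true, false_iff, not_and, not_forall]
    intro _
    exact ⟨2, le_refl 2, by omega, by decide⟩
  · by_cases hm2 : PySem.Int.mod j 2 = 0
    · have hA : isPrime j = false := by
        rw [isPrime, if_neg (by omega), if_neg (by omega), if_neg (by omega),
          if_pos (by simp only [beq_iff_eq, Bool.or_eq_true]; exact Or.inl hm2)]
      rw [hA]
      simp only [Bool.false_eq_true, false_iff, not_and, not_forall]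
      intro _
      exact ⟨2, le_refl 2, by omega, by simpa using hm2⟩
    · by_cases hm3 : PySem.Int.mod j 3 = 0
      · have hA : isPrime j = false := by
          rw [isPrime, if_neg (by omega), if_neg (by omega), if_neg (by omega),
            if_pos (by simp only [beq_iff_eq, Bool.or_eq_true]; exact Or.inr hm3)]
        rw [hA]
        have hd3 : (3:Int) ∣ j := by rwa [← PySem.Int.mod_eq_zero_iff_dvd]
        have hnd2 : ¬ (2:Int) ∣ j := by rwa [PySem.Int.mod_eq_zero_iff_dvd] at hm2
        have h9 : 9 ≤ j := by omega
        simp only [Bool.false_eq_true, false_iff, not_and, not_forall]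
        intro _
        exact ⟨3, by omega, by omega, by simpa using hm3⟩
      · have hA : isPrime j = isPrimeLoop j 5 := by
          rw [isPrime, if_neg (by omega), if_neg (by omega), if_neg (by omega),
            if_neg (by simp only [beq_iff_eq, Bool.or_eq_true, not_or]; exact ⟨hm2, hm3⟩)]
        have hbelow : ∀ e, 2 ≤ e → e < 5 → e * e ≤ j → PySem.Int.mod j e ≠ 0 := by
          intro e he2 he5 hee
          have : e = 2 ∨ e = 3 ∨ e = 4 := by omega
          rcases this with h | h | h
          · subst h; exact hm2
          · subst h; exact hm3
          · subst h
            intro hmod0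
            rw [PySem.Int.mod_eq_zero_iff_dvd] at hmod0
            exact hm2 (by rw [PySem.Int.mod_eq_zero_iff_dvd]; exact dvd_trans (by omega) hmod0)
        rw [hA, isPrimeLoop_iff j hm2 hm3 (by omega) 5 le_rfl (by decide) hbelow]
        constructor
        · exact fun h => ⟨by omega, h⟩
        · exact fun h => h.2

-- the minimal divisor of a composite j is prime and at most √j
theorem exists_min_div (j : Int) (hj : 2 ≤ j) (hnp : isPrime j = false) :
    ∃ q : Int, (2 ≤ q ∧ q * q ≤ j ∧ PySem.Int.mod j q = 0) ∧ isPrime q = true ∧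
      (∀ p, 2 ≤ p → p < q → PySem.Int.mod j p ≠ 0) := by
  have hne : ¬ (2 ≤ j ∧ ∀ e, 2 ≤ e → e * e ≤ j → PySem.Int.mod j e ≠ 0) := by
    intro h
    rw [← isPrime_iff] at h
    rw [hnp] at h
    exact Bool.noConfusion h
  have hex : ∃ e : Int, 2 ≤ e ∧ e * e ≤ j ∧ PySem.Int.mod j e = 0 := by
    by_contra hno
    push Not at hno
    exact hne ⟨hj, fun e he2 hee => hno e he2 hee⟩
  obtain ⟨e, he2, hee, hem⟩ := hex
  have hexN : ∃ n : ℕ, 2 ≤ (n:Int) ∧ (n:Int) * (n:Int) ≤ j ∧ PySem.Int.mod j (n:Int) = 0 := by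
    refine ⟨e.toNat, ?_⟩
    rw [Int.toNat_of_nonneg (by omega)]
    exact ⟨he2, hee, hem⟩
  set q0 := Nat.find hexN with hq0
  obtain ⟨hq2, hqq, hqm⟩ := Nat.find_spec hexN
  have hmin : ∀ p : Int, 2 ≤ p → p < (q0 : Int) → PySem.Int.mod j p ≠ 0 := by
    intro p hp2 hplt hpm
    have hppj : p * p ≤ j := by nlinarith
    have : ¬ (2 ≤ ((p.toNat : ℕ) : Int) ∧ ((p.toNat : ℕ):Int) * ((p.toNat:ℕ):Int) ≤ j ∧
        PySem.Int.mod j ((p.toNat:ℕ):Int) = 0) :=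
      Nat.find_min hexN (by omega)
    rw [Int.toNat_of_nonneg (by omega)] at this
    exact this ⟨hp2, hppj, hpm⟩
  refine ⟨(q0 : Int), ⟨hq2, hqq, hqm⟩, ?_, hmin⟩
  rw [isPrime_iff]
  refine ⟨hq2, ?_⟩
  intro f hf2 hff hfm
  rw [PySem.Int.mod_eq_zero_iff_dvd] at hfm
  have hdj : PySem.Int.mod j f = 0 := by
    rw [PySem.Int.mod_eq_zero_iff_dvd]
    have : (q0 : Int) ∣ j := by rwa [← PySem.Int.mod_eq_zero_iff_dvd]
    exact dvd_trans hfm this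
  exact hmin f hf2 (by nlinarith) hdj

theorem checkPrimes_false (j : Int) (q : Int) (primes : List Int)
    (hpos : ∀ p ∈ primes, 2 ≤ p) (hsort : List.Pairwise (· < ·) primes)
    (hq : q ∈ primes) (hqq : q * q ≤ j) (hmod : PySem.Int.mod j q = 0)
    (hbefore : ∀ p ∈ primes, p < q → PySem.Int.mod j p ≠ 0) :
    checkPrimes j primes = false := by
  induction primes with
  | nil => cases hq
  | cons p ps ih =>
    rw [List.pairwise_cons] at hsort
    rcases List.mem_cons.mp hq with hpq | hq'
    · subst hpq
      rw [checkPrimes, if_neg (not_lt.mpr hqq), if_pos (by simpa using hmod)]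
    · have hplt : p < q := hsort.1 q hq'
      have hp2 : 2 ≤ p := hpos p List.mem_cons_self
      have hppj : p * p ≤ j := by nlinarith
      rw [checkPrimes, if_neg (not_lt.mpr hppj),
        if_neg (by simpa using hbefore p List.mem_cons_self hplt)]
      exact ih (fun r hr => hpos r (List.mem_cons_of_mem p hr)) hsort.2 hq'
        (fun r hr => hbefore r (List.mem_cons_of_mem p hr))

theorem checkPrimes_eq_isPrime (primes : List Int) (j : Int) (hj : 2 ≤ j)
    (hmem : ∀ p, p ∈ primes ↔ (isPrime p = true ∧ p < j))
    (hsort : List.Pairwise (· < ·) primes) :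
    checkPrimes j primes = isPrime j := by
  rcases Bool.eq_false_or_eq_true (isPrime j) with hT | hF
  · rw [hT]
    apply checkPrimes_true
    intro p hp hpp
    have hpP := ((hmem p).mp hp).1
    exact ((isPrime_iff j).mp hT).2 p ((isPrime_iff p).mp hpP).1 hpp
  · rw [hF]
    obtain ⟨q, ⟨hq2, hqq, hqm⟩, hqp, hqmin⟩ := exists_min_div j hj hF
    have hqlt : q < j := by nlinarith
    apply checkPrimes_false j q primes
    · intro p hp
      exact ((isPrime_iff p).mp ((hmem p).mp hp).1).1
    · exact hsort
    · exact (hmem q).mpr ⟨hqp, hqlt⟩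
    · exact hqq
    · exact hqm
    · intro p hp hplt
      exact hqmin p ((isPrime_iff p).mp ((hmem p).mp hp).1).1 hplt

def scanMul (p : Int) : List Int → List Int
  | [] => []
  | x :: xs => (x * p) :: scanMul (x * p) xs

theorem seriesLoop_append (count i j : Int) (arr : List Int) :
    seriesLoop count i j arr = arr ++ seriesLoop count i j [] := by
  refine seriesLoop.induct count
    (fun i j _ => ∀ a, seriesLoop count i j a = a ++ seriesLoop count i j []) ?_ ?_ ?_ i j [] arr
  · intro i j _ hlt hp IH a
    rw [seriesLoop, if_pos hlt, if_pos hp, IH (a ++ [j]),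
      show seriesLoop count i j [] = seriesLoop count (i + 1) (j + 1) ([] ++ [j]) from by
        rw [seriesLoop, if_pos hlt, if_pos hp],
      IH ([] ++ [j])]
    simp
  · intro i j _ hlt hp IH a
    rw [seriesLoop, if_pos hlt, if_neg hp, IH a,
      show seriesLoop count i j [] = seriesLoop count i (j + 1) [] from by
        rw [seriesLoop, if_pos hlt, if_neg hp],
      IH ([])]
  · intro i j _ hlt a
    rw [show seriesLoop count i j [] = [] from by rw [seriesLoop, if_neg hlt],
      seriesLoop, if_neg hlt]
    simp

theorem bLoop_eq (count : Int) (primes : List Int) (j : Int)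
    (hp : ∀ p ∈ primes, 2 ≤ p) (hj : 2 ≤ j)
    (hmem : ∀ p, p ∈ primes ↔ (isPrime p = true ∧ p < j))
    (hsort : List.Pairwise (· < ·) primes) :
    bLoop count primes j hp hj = primes ++ seriesLoop count (primes.length : Int) j [] := by
  induction primes, j, hp, hj using bLoop.induct (count := count) with
  | case1 primes j hp hj hlt hchk IH =>
    have hpj : isPrime j = true := by
      rw [← checkPrimes_eq_isPrime primes j hj hmem hsort]; exact hchk
    have hmem' : ∀ p, p ∈ primes ++ [j] ↔ (isPrime p = true ∧ p < j + 1) := by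
      intro p
      rw [List.mem_append, List.mem_singleton, hmem p]
      constructor
      · rintro (⟨h1, h2⟩ | rfl)
        · exact ⟨h1, by omega⟩
        · exact ⟨hpj, by omega⟩
      · rintro ⟨h1, h2⟩
        by_cases hpe : p = j
        · exact Or.inr hpe
        · exact Or.inl ⟨h1, by omega⟩
    have hsort' : List.Pairwise (· < ·) (primes ++ [j]) := by
      rw [List.pairwise_append]
      exact ⟨hsort, List.pairwise_singleton _ _,
        fun a ha b hb => (List.mem_singleton.mp hb) ▸ ((hmem a).mp ha).2⟩
    rw [bLoop, if_pos hlt, if_pos hchk, IH hmem' hsort',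
      show seriesLoop count (primes.length : Int) j []
          = seriesLoop count ((primes.length : Int) + 1) (j + 1) ([] ++ [j]) from by
        rw [seriesLoop, if_pos hlt, if_pos hpj],
      seriesLoop_append]
    simp only [List.nil_append, List.length_append, List.length_cons, List.length_nil,
      Nat.cast_add, Nat.cast_one, Nat.cast_zero, List.append_assoc]
    rw [seriesLoop_append count ((primes.length : Int) + 1) (j + 1) [j]]
    simp
  | case2 primes j hp hj hlt hchk IH =>
    have hpj : isPrime j = false := by
      rw [← checkPrimes_eq_isPrime primes j hj hmem hsort]
      exact (Bool.eq_false_or_eq_true _).resolve_left hchk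
    have hmem' : ∀ p, p ∈ primes ↔ (isPrime p = true ∧ p < j + 1) := by
      intro p
      rw [hmem p]
      constructor
      · rintro ⟨h1, h2⟩; exact ⟨h1, by omega⟩
      · rintro ⟨h1, h2⟩
        refine ⟨h1, ?_⟩
        by_contra hge
        have : p = j := by omega
        rw [this, hpj] at h1
        exact Bool.noConfusion h1
    rw [bLoop, if_pos hlt, if_neg hchk, IH hmem' hsort,
      show seriesLoop count (primes.length : Int) j []
          = seriesLoop count (primes.length : Int) (j + 1) [] from by
        rw [seriesLoop, if_pos hlt, if_neg (by rw [hpj]; exact Bool.false_ne_true)]]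
  | case3 primes j hp hj hlt =>
    rw [bLoop, if_neg hlt,
      show seriesLoop count (primes.length : Int) j [] = [] from by
        rw [seriesLoop, if_neg hlt]]
    simp

theorem accLoop_eq (xs : List Int) : ∀ prod : Int,
    accLoop prod xs = (scanMul prod xs).map (· + 1) := by
  induction xs with
  | nil => intro prod; rfl
  | cons x xs ih =>
    intro prod
    rw [accLoop, scanMul, List.map_cons, mul_comm x prod, ih (prod * x)]

theorem foldl_tableStep (rest done : List Int) (p : Int) :
    (List.range' (done.length + 1) rest.length).foldl tableStep (done ++ p :: rest)
      = done ++ p :: scanMul p rest := by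
  induction rest generalizing done p with
  | nil => simp [scanMul]
  | cons x rs IH =>
    rw [List.length_cons, List.range'_succ, List.foldl_cons]
    have hstep : tableStep (done ++ p :: x :: rs) (done.length + 1)
        = (done ++ [p]) ++ (x * p) :: rs := by
      unfold tableStep
      rw [List.getD_eq_getElem?_getD, List.getElem?_append_right (by simp), List.getD_eq_getElem?_getD,
        List.getElem?_append_right (by simp)]
      simp
    rw [hstep]
    have := IH (done ++ [p]) (x * p)
    simp only [List.length_append, List.length_cons, List.length_nil] at this ⊢
    rw [show done.length + 1 + 1 = done.length + (1 + 1) from by omega] at this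
    rw [this]
    simp [scanMul]

theorem tableStep_scan (arr : List Int) :
    (List.range' 1 (arr.length - 1)).foldl tableStep arr = scanMul 1 arr := by
  cases arr with
  | nil => simp [scanMul]
  | cons a t =>
    have := foldl_tableStep t [] a
    simp only [List.length_nil, List.nil_append, Nat.zero_add] at this
    rw [List.length_cons, Nat.add_sub_cancel, this, scanMul]
    simp [mul_one]

-- ===== VERDICT (by name: the statement is the Claim_ definition above) =====
theorem prime_table_spec : Claim_equal_prime_table := by
  intro count _ hpre
  unfold Pre_prime_table at hpre
  unfold Spec_prime_table prime_table prime_table_alt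
  rw [if_neg (by omega), if_neg (by omega)]
  simp only []
  rw [tableStep_scan]
  rw [bLoop_eq count [] 2 _ _
    (by intro p
        simp only [List.not_mem_nil, false_iff, not_and]
        intro hp
        have := ((isPrime_iff p).mp hp).1
        omega)
    (List.Pairwise.nil)]
  rw [accLoop_eq]
  simp
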